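-- pv_equiv track=rewrite | github.com/limits220284/CP | leetcode/LCP 77.符文储备.py | runeReserve
-- ===== SOURCE A (Python) =====
-- from typing import List
--
-- def runeReserve(runes: List[int]) -> int:
--     runes.sort()
--     n = len(runes)
--     ans = cnt = 1
--     for i in range(1, n):
--         if runes[i] - runes[i-1] <= 1:
--             cnt += 1
--             ans = max(ans, cnt)
--         else:
--             cnt = 1
--     return ans
-- ===== SOURCE B (Python) =====
-- from typing import List
--
-- def runeReserve(runes: List[int]) -> int:
--     runes.sort()
--     n = len(runes)
--     bounds = [0] + [i for i in range(1, n) if runes[i] - runes[i-1] > 1] + [n]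
--     best = 1
--     for a, b in zip(bounds, bounds[1:]):
--         best = max(best, b - a)
--     return best
-- ===== Notes on version B (the rewrite author's own statement) =====
-- stated objective: alternative
-- what changed: Replaces the running-counter fold (cnt/ans updated per element) by a locate-then-measure decomposition: collect the breakpoint indices where the sorted gap exceeds 1, form the segment bounds list from 0, the breakpoints and n, and take the maximum difference of consecutive bounds.
import Mathlib
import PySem

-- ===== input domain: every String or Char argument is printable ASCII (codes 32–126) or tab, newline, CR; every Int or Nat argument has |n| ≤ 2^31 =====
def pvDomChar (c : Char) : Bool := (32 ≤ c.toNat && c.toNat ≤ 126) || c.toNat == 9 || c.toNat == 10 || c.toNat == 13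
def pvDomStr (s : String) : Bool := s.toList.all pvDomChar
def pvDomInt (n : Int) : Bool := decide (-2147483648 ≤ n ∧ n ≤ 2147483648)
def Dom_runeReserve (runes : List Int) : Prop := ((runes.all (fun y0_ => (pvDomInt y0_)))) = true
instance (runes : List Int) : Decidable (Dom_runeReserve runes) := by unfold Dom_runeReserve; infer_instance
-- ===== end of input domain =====

-- B replaces A's running-counter fold by collecting breakpoint indices and measuring the
-- segments between consecutive bounds (alternative decomposition, same cost).
-- Both A and B sort the argument list in place; the equivalence proved is about the return value.

-- ===== PORT A =====
def runeReserve (runes : List Int) : Int :=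
  let rs := PySem.List.sorted runes (fun x => x) false
  let n : Int := (rs.length : Int)
  let st := (PySem.List.pyRange 1 n 1).foldl
    (fun (s : Int × Int) i =>
      if PySem.List.pyGetD rs i 0 - PySem.List.pyGetD rs (i - 1) 0 ≤ 1 then
        (max s.1 (s.2 + 1), s.2 + 1)
      else (s.1, 1)) (1, 1)
  st.1

-- ===== PORT B =====
def runeReserve_alt (runes : List Int) : Int :=
  let rs := PySem.List.sorted runes (fun x => x) false
  let n : Int := (rs.length : Int)
  let breaks := (PySem.List.pyRange 1 n 1).filter
    (fun i => decide (1 < PySem.List.pyGetD rs i 0 - PySem.List.pyGetD rs (i - 1) 0))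
  let bounds := 0 :: (breaks ++ [n])
  (bounds.zip (PySem.List.slice bounds (some 1) none)).foldl
    (fun best ab => max best (ab.2 - ab.1)) 1

-- ===== PRECONDITION & SPEC =====
def Spec_runeReserve (runes : List Int) (out : Int) : Prop := out = runeReserve_alt runes
instance (runes : List Int) (out : Int) : Decidable (Spec_runeReserve runes out) := by unfold Spec_runeReserve; infer_instance

-- ===== CLAIM (what is proved, stated in full; the proofs are below) =====
def Claim_equal_runeReserve : Prop := ∀ (runes : List Int), Dom_runeReserve runes → Spec_runeReserve runes (runeReserve runes)

-- ===== LEMMAS AND PROOFS =====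

-- max-of-closed-segments accumulator: fold over the break list keeping (best closed diff, last bound)
def pvMC (s : Int × Int) (bs : List Int) : Int × Int :=
  bs.foldl (fun s b => (max s.1 (b - s.2), b)) s

theorem pvMC_ge (bs : List Int) (s : Int × Int) : s.1 ≤ (pvMC s bs).1 := by
  induction bs generalizing s with
  | nil => simp [pvMC]
  | cons b t ih =>
      have h := ih (max s.1 (b - s.2), b)
      simp only [pvMC, List.foldl_cons] at *
      exact le_trans (le_max_left _ _) h

theorem pvMC_append_singleton (s : Int × Int) (bs : List Int) (b : Int) :
    pvMC s (bs ++ [b]) = (max (pvMC s bs).1 (b - (pvMC s bs).2), b) := by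
  simp [pvMC, List.foldl_append]

-- B's zip-fold over consecutive bounds equals the accumulator view
theorem pvZipFold (bs : List Int) (best prev n : Int) :
    ((prev :: (bs ++ [n])).zip (bs ++ [n])).foldl
      (fun best ab => max best (ab.2 - ab.1)) best
    = max (pvMC (best, prev) bs).1 (n - (pvMC (best, prev) bs).2) := by
  induction bs generalizing best prev with
  | nil => simp [pvMC]
  | cons b t ih =>
      simp only [List.cons_append, List.zip_cons_cons, List.foldl_cons]
      simpa [pvMC] using ih (max best (b - prev)) b

-- A's scanning fold equals the breakpoint/accumulator view
theorem pvScanFold (q : Int → Prop) [DecidablePred q] (m : ℕ) (hm : 1 ≤ m) :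
    (PySem.List.pyRange 1 (m : Int) 1).foldl
      (fun (s : Int × Int) i => if q i then (max s.1 (s.2 + 1), s.2 + 1) else (s.1, 1)) (1, 1)
    = (max (pvMC (1, 0) ((PySem.List.pyRange 1 (m : Int) 1).filter (fun i => !(decide (q i))))).1
           ((m : Int) - (pvMC (1, 0) ((PySem.List.pyRange 1 (m : Int) 1).filter (fun i => !(decide (q i))))).2),
       (m : Int) - (pvMC (1, 0) ((PySem.List.pyRange 1 (m : Int) 1).filter (fun i => !(decide (q i))))).2) := by
  induction m with
  | zero => omega
  | succ k ih =>
      by_cases hk : 1 ≤ k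
      · have hsplit : PySem.List.pyRange 1 ((k + 1 : ℕ) : Int) 1
            = PySem.List.pyRange 1 (k : Int) 1 ++ [(k : Int)] := by
          push_cast
          exact PySem.List.pyRange_one_succ_right (by exact_mod_cast hk)
        rw [hsplit, List.foldl_append, List.filter_append, ih hk]
        have hge := pvMC_ge ((PySem.List.pyRange 1 (k : Int) 1).filter (fun i => !(decide (q i)))) (1, 0)
        set c := pvMC (1, 0) ((PySem.List.pyRange 1 (k : Int) 1).filter (fun i => !(decide (q i)))) with hc
        by_cases hq : q (k : Int)
        · simp only [List.filter_cons, List.filter_nil, hq, decide_true, Bool.not_true,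
            Bool.false_eq_true, if_false, List.append_nil, List.foldl_cons, List.foldl_nil]
          rw [← hc]
          push_cast
          rw [Prod.mk.injEq]
          refine ⟨?_, ?_⟩ <;> omega
        · simp only [List.filter_cons, List.filter_nil, hq, decide_false, Bool.not_false,
            if_true, List.foldl_cons, List.foldl_nil, pvMC_append_singleton, ← hc]
          have hge' : (1 : Int) ≤ c.1 := hge
          push_cast
          rw [Prod.mk.injEq]
          refine ⟨?_, ?_⟩ <;> omega
      · have hk0 : k = 0 := by omega
        subst hk0
        simp [pvMC]

-- ===== VERDICT (by name: the statement is the Claim_ definition above) =====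
theorem runeReserve_spec : Claim_equal_runeReserve := by
  intro runes _
  unfold Spec_runeReserve runeReserve runeReserve_alt
  set rs := PySem.List.sorted runes (fun x => x) false with hrs
  have hslice : PySem.List.slice
      ((0 : Int) :: (((PySem.List.pyRange 1 (rs.length : Int) 1).filter
        (fun i => decide (1 < PySem.List.pyGetD rs i 0 - PySem.List.pyGetD rs (i - 1) 0))) ++ [(rs.length : Int)]))
      (some 1) none
      = ((PySem.List.pyRange 1 (rs.length : Int) 1).filter
        (fun i => decide (1 < PySem.List.pyGetD rs i 0 - PySem.List.pyGetD rs (i - 1) 0))) ++ [(rs.length : Int)] := by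
    simp [PySem.List.slice]
  simp only [hslice]
  have hfilter : ((PySem.List.pyRange 1 (rs.length : Int) 1).filter
        (fun i => decide (1 < PySem.List.pyGetD rs i 0 - PySem.List.pyGetD rs (i - 1) 0)))
      = ((PySem.List.pyRange 1 (rs.length : Int) 1).filter
        (fun i => !(decide (PySem.List.pyGetD rs i 0 - PySem.List.pyGetD rs (i - 1) 0 ≤ 1)))) := by
    apply List.filter_congr
    intro i _
    simp only [← decide_not, not_le]
  rw [hfilter, pvZipFold]
  by_cases hlen : 1 ≤ rs.length
  · rw [pvScanFold (fun i => PySem.List.pyGetD rs i 0 - PySem.List.pyGetD rs (i - 1) 0 ≤ 1) rs.length hlen]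
  · have h0 : rs.length = 0 := by omega
    rw [h0]
    simp [pvMC]
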